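-- pv_equiv track=rewrite | github.com/rajajiswan/prcheck | src/pr_security_checker.py | _matches_sensitive_file
-- ===== SOURCE A (Python) =====
-- from typing import List, Optional
--
-- _SENSITIVE_FILES: List[str] = [
--     ".env",
--     ".env.local",
--     ".env.production",
--     "id_rsa",
--     "id_ed25519",
--     "*.pem",
--     "*.key",
--     "credentials.json",
--     "secrets.yaml",
--     "secrets.yml",
-- ]
--
-- def _matches_sensitive_file(filename: str) -> Optional[str]:
--     for pattern in _SENSITIVE_FILES:
--         if pattern.startswith("*"):
--             if filename.endswith(pattern[1:]):
--                 return pattern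
--         elif filename == pattern or filename.endswith("/" + pattern):
--             return pattern
--     return None
-- ===== SOURCE B (Python) =====
-- from typing import Optional
--
-- _EXACT_NAMES = {
--     ".env", ".env.local", ".env.production",
--     "id_rsa", "id_ed25519",
--     "credentials.json", "secrets.yaml", "secrets.yml",
-- }
--
-- _WILDCARD_SUFFIXES = (".pem", ".key")
--
-- def _matches_sensitive_file(filename: str) -> Optional[str]:
--     basename = filename.rsplit("/", 1)[-1]
--     if basename in _EXACT_NAMES:
--         return basename
--     for suffix in _WILDCARD_SUFFIXES:
--         if filename.endswith(suffix):
--             return "*" + suffix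
--     return None
-- ===== Notes on version B (the rewrite author's own statement) =====
-- stated objective: simpler
-- what changed: B extracts the basename once (rsplit on the last '/') and replaces A's ten-branch per-pattern scan with one membership test in a constant set of the eight exact names followed by a two-element suffix loop; this is valid because no filename can match both an exact name and a wildcard suffix, so A's interleaved pattern order is irrelevant.
import Mathlib
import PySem

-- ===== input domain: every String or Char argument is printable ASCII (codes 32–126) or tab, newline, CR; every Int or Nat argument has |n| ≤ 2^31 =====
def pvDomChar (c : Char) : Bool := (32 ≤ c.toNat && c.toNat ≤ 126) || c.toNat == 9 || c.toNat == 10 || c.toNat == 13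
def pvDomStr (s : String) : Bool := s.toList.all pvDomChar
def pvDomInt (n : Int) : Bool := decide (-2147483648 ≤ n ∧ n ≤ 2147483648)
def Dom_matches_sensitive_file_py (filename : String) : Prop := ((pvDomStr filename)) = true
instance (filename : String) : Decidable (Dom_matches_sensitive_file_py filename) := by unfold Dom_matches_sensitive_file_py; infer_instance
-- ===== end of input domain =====

-- B replaces A's per-pattern branch scan by one basename extraction, a constant exact-name
-- set membership test and a short suffix pass (objective: simpler; same cost).

-- ===== PORT A =====
def pvSensitiveFiles : List String :=
  [".env", ".env.local", ".env.production", "id_rsa", "id_ed25519",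
   "*.pem", "*.key", "credentials.json", "secrets.yaml", "secrets.yml"]

def pvMatchLoop (filename : String) : List String → Option String
  | [] => none
  | pattern :: rest =>
    if PySem.Str.startswith pattern "*" then
      if PySem.Str.endswith filename (PySem.Str.slice pattern (some 1) none) then some pattern
      else pvMatchLoop filename rest
    else if filename == pattern || PySem.Str.endswith filename ("/" ++ pattern) then some pattern
    else pvMatchLoop filename rest

def matches_sensitive_file_py (filename : String) : Option String :=
  pvMatchLoop filename pvSensitiveFiles

-- ===== PORT B =====
def pvExactNames : List String :=
  [".env", ".env.local", ".env.production", "id_rsa", "id_ed25519",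
   "credentials.json", "secrets.yaml", "secrets.yml"]

def pvWildcardSuffixes : List String := [".pem", ".key"]

-- hand port of filename.rsplit("/", 1)[-1]: the part after the LAST '/' (the whole string
-- if there is no '/'); exact, since with maxsplit = 1 the last piece is exactly that part
def pvBasename (filename : String) : String :=
  String.ofList ((filename.toList.reverse.takeWhile (fun c => c != '/')).reverse)

def matches_sensitive_file_py_alt (filename : String) : Option String :=
  let basename := pvBasename filename
  if basename ∈ pvExactNames then some basename
  else
    match pvWildcardSuffixes.find? (fun suffix => PySem.Str.endswith filename suffix) with
    | some suffix => some ("*" ++ suffix)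
    | none => none



-- ===== LEMMAS AND PROOFS =====

-- ===== PRECONDITION & SPEC =====
def Spec_matches_sensitive_file_py (filename : String) (out : Option String) : Prop := out = matches_sensitive_file_py_alt filename
instance (filename : String) (out : Option String) : Decidable (Spec_matches_sensitive_file_py filename out) := by unfold Spec_matches_sensitive_file_py; infer_instance

-- ===== CLAIM (what is proved, stated in full; the proofs are below) =====
def Claim_equal_matches_sensitive_file_py : Prop := ∀ (filename : String), Dom_matches_sensitive_file_py filename → Spec_matches_sensitive_file_py filename (matches_sensitive_file_py filename)

-- ===== LEMMAS AND PROOFS =====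

-- the List-level basename
def pvBn (l : List Char) : List Char := (l.reverse.takeWhile (fun c => c != '/')).reverse

lemma pvBn_suffix (l : List Char) : pvBn l <:+ l := by
  have h := List.takeWhile_prefix (l := l.reverse) (fun c => c != '/')
  rw [← List.reverse_suffix] at h
  simpa [pvBn] using h

lemma pvBn_of_no_slash (l : List Char) (h : '/' ∉ l) : pvBn l = l := by
  unfold pvBn
  rw [List.takeWhile_eq_self_iff.mpr, List.reverse_reverse]
  intro c hc
  simp only [bne_iff_ne, ne_eq]
  rintro rfl
  exact h (List.mem_reverse.mp hc)

lemma pvBn_append_slash (xs ys : List Char) (h : '/' ∉ ys) :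
    pvBn (xs ++ '/' :: ys) = ys := by
  have hys : List.takeWhile (fun c => c != '/') ys.reverse = ys.reverse := by
    rw [List.takeWhile_eq_self_iff]
    intro c hc
    simp only [bne_iff_ne, ne_eq]
    rintro rfl
    exact h (List.mem_reverse.mp hc)
  unfold pvBn
  rw [List.reverse_append, List.reverse_cons, List.append_assoc, List.takeWhile_append]
  simp [hys]

lemma pvBn_append_cons (xs ys : List Char) (c : Char) (hc : c ≠ '/') (h : '/' ∉ ys) :
    pvBn (xs ++ c :: ys) = pvBn xs ++ c :: ys := by
  have hys : List.takeWhile (fun c => c != '/') ys.reverse = ys.reverse := by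
    rw [List.takeWhile_eq_self_iff]
    intro d hd
    simp only [bne_iff_ne, ne_eq]
    rintro rfl
    exact h (List.mem_reverse.mp hd)
  unfold pvBn
  rw [List.reverse_append, List.reverse_cons, List.append_assoc, List.takeWhile_append]
  simp [hys, hc]

lemma pvCond_iff (p l : List Char) (hp : '/' ∉ p) :
    (l = p ∨ ('/' :: p) <:+ l) ↔ pvBn l = p := by
  constructor
  · rintro (rfl | ⟨pre, rfl⟩)
    · exact pvBn_of_no_slash _ hp
    · exact pvBn_append_slash pre p hp
  · intro h
    obtain ⟨pre, hpre⟩ := pvBn_suffix l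
    rw [h] at hpre
    rcases List.eq_nil_or_concat pre with rfl | ⟨pre', c, rfl⟩
    · left; simpa using hpre.symm
    · by_cases hc : c = '/'
      · right
        subst hc
        exact ⟨pre', by simpa using hpre⟩
      · exfalso
        rw [List.concat_eq_append, List.append_assoc, List.singleton_append] at hpre
        have := pvBn_append_cons pre' p c hc hp
        rw [hpre, h] at this
        have hlen := congrArg List.length this
        simp at hlen
        omega

-- A's exact-pattern test is the basename test
lemma pvCond_exact (p f : String) (hp : '/' ∉ p.toList) :
    (f == p || PySem.Str.endswith f ("/" ++ p)) = decide (pvBn f.toList = p.toList) := by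
  have h := pvCond_iff p.toList f.toList hp
  rw [Bool.eq_iff_iff]
  simp only [Bool.or_eq_true, beq_iff_eq, PySem.Str.endswith_eq, PySem.Chars.endswith_iff,
    decide_eq_true_eq]
  rw [← h, String.toList_append]
  constructor
  · rintro (rfl | hs)
    · exact Or.inl rfl
    · exact Or.inr (by simpa using hs)
  · rintro (hl | hs)
    · exact Or.inl (String.toList_inj.mp hl)
    · exact Or.inr (by simpa using hs)

lemma pvA_char (f : String) : matches_sensitive_file_py f =
    (if pvBn f.toList = ".env".toList then some ".env"
     else if pvBn f.toList = ".env.local".toList then some ".env.local"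
     else if pvBn f.toList = ".env.production".toList then some ".env.production"
     else if pvBn f.toList = "id_rsa".toList then some "id_rsa"
     else if pvBn f.toList = "id_ed25519".toList then some "id_ed25519"
     else if PySem.Str.endswith f ".pem" then some "*.pem"
     else if PySem.Str.endswith f ".key" then some "*.key"
     else if pvBn f.toList = "credentials.json".toList then some "credentials.json"
     else if pvBn f.toList = "secrets.yaml".toList then some "secrets.yaml"
     else if pvBn f.toList = "secrets.yml".toList then some "secrets.yml"
     else none) := by
  unfold matches_sensitive_file_py pvSensitiveFiles
  simp only [pvMatchLoop]
  simp only [show PySem.Str.startswith ".env" "*" = false from rfl,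
    show PySem.Str.startswith ".env.local" "*" = false from rfl,
    show PySem.Str.startswith ".env.production" "*" = false from rfl,
    show PySem.Str.startswith "id_rsa" "*" = false from rfl,
    show PySem.Str.startswith "id_ed25519" "*" = false from rfl,
    show PySem.Str.startswith "*.pem" "*" = true from rfl,
    show PySem.Str.startswith "*.key" "*" = true from rfl,
    show PySem.Str.startswith "credentials.json" "*" = false from rfl,
    show PySem.Str.startswith "secrets.yaml" "*" = false from rfl,
    show PySem.Str.startswith "secrets.yml" "*" = false from rfl,
    show PySem.Str.slice "*.pem" (some 1) none = ".pem" from rfl,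
    show PySem.Str.slice "*.key" (some 1) none = ".key" from rfl,
    Bool.false_eq_true, if_false, if_true,
    pvCond_exact ".env" f (by decide),
    pvCond_exact ".env.local" f (by decide),
    pvCond_exact ".env.production" f (by decide),
    pvCond_exact "id_rsa" f (by decide),
    pvCond_exact "id_ed25519" f (by decide),
    pvCond_exact "credentials.json" f (by decide),
    pvCond_exact "secrets.yaml" f (by decide),
    pvCond_exact "secrets.yml" f (by decide),
    decide_eq_true_eq]


lemma pvOfList_eq (a : List Char) (p : String) : (String.ofList a = p) ↔ a = p.toList := by
  constructor
  · intro h; rw [← h, String.toList_ofList]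
  · intro h; rw [h, String.ofList_toList]

lemma pvMem_exact (bn : List Char) : (String.ofList bn ∈ pvExactNames) ↔
    (bn = ".env".toList ∨ bn = ".env.local".toList ∨ bn = ".env.production".toList ∨
     bn = "id_rsa".toList ∨ bn = "id_ed25519".toList ∨ bn = "credentials.json".toList ∨
     bn = "secrets.yaml".toList ∨ bn = "secrets.yml".toList) := by
  simp [pvExactNames, pvOfList_eq]

lemma pvB_char (f : String) : matches_sensitive_file_py_alt f =
    (if pvBn f.toList = ".env".toList then some ".env"
     else if pvBn f.toList = ".env.local".toList then some ".env.local"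
     else if pvBn f.toList = ".env.production".toList then some ".env.production"
     else if pvBn f.toList = "id_rsa".toList then some "id_rsa"
     else if pvBn f.toList = "id_ed25519".toList then some "id_ed25519"
     else if pvBn f.toList = "credentials.json".toList then some "credentials.json"
     else if pvBn f.toList = "secrets.yaml".toList then some "secrets.yaml"
     else if pvBn f.toList = "secrets.yml".toList then some "secrets.yml"
     else if PySem.Str.endswith f ".pem" then some "*.pem"
     else if PySem.Str.endswith f ".key" then some "*.key"
     else none) := by
  unfold matches_sensitive_file_py_alt pvWildcardSuffixes
  rw [show pvBasename f = String.ofList (pvBn f.toList) from rfl]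
  by_cases h1 : pvBn f.toList = ".env".toList
  · simp [h1, pvExactNames]
  · by_cases h2 : pvBn f.toList = ".env.local".toList
    · simp [h2, pvExactNames]
    · by_cases h3 : pvBn f.toList = ".env.production".toList
      · simp [h3, pvExactNames]
      · by_cases h4 : pvBn f.toList = "id_rsa".toList
        · simp [h4, pvExactNames]
        · by_cases h5 : pvBn f.toList = "id_ed25519".toList
          · simp [h5, pvExactNames]
          · by_cases h6 : pvBn f.toList = "credentials.json".toList
            · simp [h6, pvExactNames]
            · by_cases h7 : pvBn f.toList = "secrets.yaml".toList
              · simp [h7, pvExactNames]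
              · by_cases h8 : pvBn f.toList = "secrets.yml".toList
                · simp [h8, pvExactNames]
                · simp only [pvMem_exact, h1, h2, h3, h4, h5, h6, h7, h8, or_self, if_false]
                  by_cases hpem : PySem.Chars.endswith f.toList ['.', 'p', 'e', 'm'] = true
                  · simp [List.find?, hpem]
                  · by_cases hkey : PySem.Chars.endswith f.toList ['.', 'k', 'e', 'y'] = true
                    · simp [List.find?, hpem, hkey]
                    · simp [List.find?, hpem, hkey]

lemma pvSuffix_excl (f : String) (suf p : List Char) (hsuf : PySem.Str.endswith f (String.ofList suf) = true)
    (hlen : suf.length ≤ p.length) (hns : ¬ suf <:+ p) : pvBn f.toList ≠ p := by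
  intro h
  rw [PySem.Str.endswith_eq, PySem.Chars.endswith_iff, String.toList_ofList] at hsuf
  have hb : p <:+ f.toList := h ▸ pvBn_suffix f.toList
  rcases List.suffix_or_suffix_of_suffix hsuf hb with h' | h'
  · exact hns h'
  · exact hns (h'.eq_of_length_le hlen ▸ List.suffix_refl _)

lemma pvIte_swap {α : Type} (cp ck c6 c7 c8 : Prop) [Decidable cp] [Decidable ck]
    [Decidable c6] [Decidable c7] [Decidable c8] (vp vk v6 v7 v8 n : α)
    (hp6 : cp → ¬c6) (hp7 : cp → ¬c7) (hp8 : cp → ¬c8)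
    (hk6 : ck → ¬c6) (hk7 : ck → ¬c7) (hk8 : ck → ¬c8) :
    (if cp then vp else if ck then vk else if c6 then v6 else if c7 then v7 else if c8 then v8 else n)
    = (if c6 then v6 else if c7 then v7 else if c8 then v8 else if cp then vp else if ck then vk else n) := by
  split_ifs <;> tauto

-- ===== VERDICT (by name: the statement is the Claim_ definition above) =====
theorem matches_sensitive_file_py_spec : Claim_equal_matches_sensitive_file_py := by
  intro f _
  unfold Spec_matches_sensitive_file_py
  rw [pvA_char, pvB_char,
    pvIte_swap (PySem.Str.endswith f ".pem" = true) (PySem.Str.endswith f ".key" = true)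
      (pvBn f.toList = "credentials.json".toList) (pvBn f.toList = "secrets.yaml".toList)
      (pvBn f.toList = "secrets.yml".toList)
      (some "*.pem") (some "*.key") (some "credentials.json") (some "secrets.yaml")
      (some "secrets.yml") none
      (fun hp => pvSuffix_excl f ".pem".toList _ (by simpa using hp) (by decide) (by decide))
      (fun hp => pvSuffix_excl f ".pem".toList _ (by simpa using hp) (by decide) (by decide))
      (fun hp => pvSuffix_excl f ".pem".toList _ (by simpa using hp) (by decide) (by decide))
      (fun hk => pvSuffix_excl f ".key".toList _ (by simpa using hk) (by decide) (by decide))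
      (fun hk => pvSuffix_excl f ".key".toList _ (by simpa using hk) (by decide) (by decide))
      (fun hk => pvSuffix_excl f ".key".toList _ (by simpa using hk) (by decide) (by decide))]
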